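-- pv_equiv track=rewrite | github.com/RuneBlaze/pineapple-pen | src/genio/gears/card_printer.py | printable_tokens
-- ===== SOURCE A (Python) =====
-- def printable_tokens(word: str) -> list[str] | None:
--     if len(word) <= 9:
--         return [word]
--     if " " not in word:
--         return None
--     tokens = word.split()
--     if len(tokens) > 2:
--         return None
--     if all(printable_tokens(token) for token in tokens):
--         return tokens
-- ===== SOURCE B (Python) =====
-- def printable_tokens(word: str) -> list[str] | None:
--     if len(word) <= 9:
--         return [word]
--     tokens = word.split()
--     if " " in word and len(tokens) <= 2 and max(map(len, tokens), default=0) <= 9: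
--         return tokens
--     return None
-- ===== Notes on version B (the rewrite author's own statement) =====
-- stated objective: simpler
-- what changed: Replaces A's self-recursion inside all(...) and its early-return None chain with a single flat guard: split once, then return the tokens iff the word has a space, at most two tokens, and the longest token (max of the lengths, default 0 for the all-whitespace case) is at most 9 characters.
import Mathlib
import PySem

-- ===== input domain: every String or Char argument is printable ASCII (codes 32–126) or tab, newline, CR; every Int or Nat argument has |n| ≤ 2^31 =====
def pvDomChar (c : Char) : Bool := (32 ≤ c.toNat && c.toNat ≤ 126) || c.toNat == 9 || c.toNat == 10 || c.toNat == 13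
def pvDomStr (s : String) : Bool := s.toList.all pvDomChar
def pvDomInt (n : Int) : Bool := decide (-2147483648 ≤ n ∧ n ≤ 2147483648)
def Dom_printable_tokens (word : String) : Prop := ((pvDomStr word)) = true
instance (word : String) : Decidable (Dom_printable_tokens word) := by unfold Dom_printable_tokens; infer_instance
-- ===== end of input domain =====

-- B replaces A's self-recursive all(printable_tokens(t)) check and early-return None chain by one flat guard on the max token length (objective: simpler).


-- ===== PORT A =====
-- termination helpers for A's self-recursion (cited by name in decreasing_by):
-- every token of word.split() is whitespace-free and strictly shorter than word
-- whenever word contains a space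
theorem pv_split0_go_bound (l : List Char) : ∀ (cur : List Char) (acc : List (List Char)) (t : List Char),
    (∀ c ∈ cur, PySem.Chars.isspace c = false) →
    t ∈ PySem.Chars.split₀.go l cur acc →
    t ∈ acc ∨
      ((∀ c ∈ t, PySem.Chars.isspace c = false) ∧
       t.length ≤ cur.length + l.countP (fun c => !PySem.Chars.isspace c)) := by
  induction l with
  | nil =>
    intro cur acc t hcur ht
    unfold PySem.Chars.split₀.go at ht
    by_cases hc : cur.isEmpty
    · simp [hc] at ht
      exact Or.inl ht
    · simp [hc] at ht
      rcases ht with ht | rfl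
      · exact Or.inl ht
      · exact Or.inr ⟨fun c hc => hcur c (List.mem_reverse.mp hc), by simp⟩
  | cons c rest ih =>
    intro cur acc t hcur ht
    unfold PySem.Chars.split₀.go at ht
    by_cases hs : PySem.Chars.isspace c
    · by_cases hc : cur.isEmpty
      · simp [hs, hc] at ht
        rcases ih [] acc t (by simp) ht with h | ⟨h1, h2⟩
        · exact Or.inl h
        · refine Or.inr ⟨h1, ?_⟩
          simp [hs] at h2 ⊢
          omega
      · simp [hs, hc] at ht
        rcases ih [] (cur.reverse :: acc) t (by simp) ht with h | ⟨h1, h2⟩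
        · rcases List.mem_cons.mp h with rfl | h
          · exact Or.inr ⟨fun d hd => hcur d (List.mem_reverse.mp hd), by simp⟩
          · exact Or.inl h
        · refine Or.inr ⟨h1, ?_⟩
          simp [hs] at h2 ⊢
          omega
    · simp [hs] at ht
      rcases ih (c :: cur) acc t (by
          intro d hd
          rcases List.mem_cons.mp hd with rfl | h
          · simpa using hs
          · exact hcur d h) ht with h | ⟨h1, h2⟩
      · exact Or.inl h
      · refine Or.inr ⟨h1, ?_⟩
        simp [hs] at h2 ⊢
        omega

theorem pv_split0_token_bound (l t : List Char) (ht : t ∈ PySem.Chars.split₀ l) :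
    (∀ c ∈ t, PySem.Chars.isspace c = false) ∧
    t.length ≤ l.countP (fun c => !PySem.Chars.isspace c) := by
  rcases pv_split0_go_bound l [] [] t (by simp) (by simpa [PySem.Chars.split₀] using ht) with h | h
  · simp at h
  · simpa using h

theorem pv_token_lt (word t : String) (hsp : PySem.Str.isIn " " word = true)
    (ht : t ∈ PySem.Str.split₀ word) : t.toList.length < word.toList.length := by
  have h1 : t.toList ∈ PySem.Chars.split₀ word.toList := by
    rw [← PySem.Str.split₀_map_toList]
    exact List.mem_map_of_mem ht
  have h2 := pv_split0_token_bound word.toList t.toList h1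
  have hsp' : ' ' ∈ word.toList := by
    have h := (PySem.Str.isIn_iff_infix " " word).mp hsp
    exact (List.singleton_infix_iff ' ' word.toList).mp (by simpa using h)
  have hlt : word.toList.countP (fun c => !PySem.Chars.isspace c) < word.toList.length := by
    refine lt_of_le_of_ne List.countP_le_length ?_
    intro heq
    have := List.countP_eq_length.mp heq ' ' hsp'
    simp [show PySem.Chars.isspace ' ' = true from by decide] at this
  omega

def printable_tokens (word : String) : Option (List String) :=
  if PySem.Str.len word ≤ 9 then some [word]
  else if hsp : PySem.Str.isIn " " word = false then none
  else
    let tokens := PySem.Str.split₀ word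
    if PySem.List.len tokens > 2 then none
    else if tokens.attach.all (fun t =>
        match printable_tokens t.1 with
        | some ts => !ts.isEmpty
        | none => false) then some tokens
    else none
termination_by word.toList.length
decreasing_by
  exact pv_token_lt word _ (by simpa using hsp) t.2

-- ===== PORT B =====
def printable_tokens_alt (word : String) : Option (List String) :=
  if PySem.Str.len word ≤ 9 then some [word]
  else
    let tokens := PySem.Str.split₀ word
    if PySem.Str.isIn " " word
        && decide (PySem.List.len tokens ≤ 2)
        && decide ((tokens.map PySem.Str.len).foldl max 0 ≤ 9)
    then some tokens else none


-- ===== PRECONDITION & SPEC =====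
def Spec_printable_tokens (word : String) (out : Option (List String)) : Prop := out = printable_tokens_alt word
instance (word : String) (out : Option (List String)) : Decidable (Spec_printable_tokens word out) := by unfold Spec_printable_tokens; infer_instance

-- ===== CLAIM (what is proved, stated in full; the proofs are below) =====
def Claim_equal_printable_tokens : Prop := ∀ (word : String), Dom_printable_tokens word → Spec_printable_tokens word (printable_tokens word)

-- ===== LEMMAS AND PROOFS =====
theorem pv_foldl_max_le (xs : List Int) (a : Int) :
    xs.foldl max a ≤ 9 ↔ a ≤ 9 ∧ ∀ x ∈ xs, x ≤ 9 := by
  induction xs generalizing a with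
  | nil => simp
  | cons x xs ih =>
    rw [List.foldl_cons, ih, max_le_iff]
    constructor
    · rintro ⟨⟨h1, h2⟩, h3⟩
      exact ⟨h1, fun y hy => by rcases List.mem_cons.mp hy with rfl | h; exact h2; exact h3 y h⟩
    · rintro ⟨h1, h2⟩
      exact ⟨⟨h1, h2 x (List.mem_cons_self)⟩, fun y hy => h2 y (List.mem_cons_of_mem x hy)⟩

theorem pv_token_truthy (word t : String) (ht : t ∈ PySem.Str.split₀ word) :
    (match printable_tokens t with
      | some ts => !ts.isEmpty
      | none => false) = decide (PySem.Str.len t ≤ 9) := by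
  have h1 : t.toList ∈ PySem.Chars.split₀ word.toList := by
    rw [← PySem.Str.split₀_map_toList]
    exact List.mem_map_of_mem ht
  have hns := (pv_split0_token_bound word.toList t.toList h1).1
  have hnotin : PySem.Str.isIn " " t = false := by
    rw [← Bool.not_eq_true, PySem.Str.isIn_iff_infix]
    intro h
    have hm : ' ' ∈ t.toList := (List.singleton_infix_iff ' ' t.toList).mp (by simpa using h)
    have := hns ' ' hm
    simp [show PySem.Chars.isspace ' ' = true from by decide] at this
  by_cases h9 : PySem.Str.len t ≤ 9
  · rw [printable_tokens]
    simp only [h9, if_true]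
    simp
  · rw [printable_tokens]
    simp only [h9, if_false, hnotin, dif_pos]
    simp

theorem printable_tokens_eq_alt (word : String) :
    printable_tokens word = printable_tokens_alt word := by
  rw [printable_tokens, printable_tokens_alt]
  by_cases h9 : PySem.Str.len word ≤ 9
  · rw [if_pos h9, if_pos h9]
  · rw [if_neg h9, if_neg h9]
    by_cases hsp : PySem.Str.isIn " " word = false
    · have hspC : PySem.Chars.isIn [' '] word.toList = false := by
        simpa [PySem.Str.isIn] using hsp
      rw [dif_pos hsp, if_neg (by simp [hspC])]
    · have hsp' : PySem.Str.isIn " " word = true := by simpa using hsp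
      have hspC' : PySem.Chars.isIn [' '] word.toList = true := by
        simpa [PySem.Str.isIn] using hsp'
      rw [dif_neg hsp]
      by_cases hlen : PySem.List.len (PySem.Str.split₀ word) > 2
      · have hlenN : 2 < (PySem.Str.split₀ word).length := by
          rw [PySem.List.len_eq] at hlen
          exact_mod_cast hlen
        rw [if_pos hlen, if_neg (by simp; intro _ h; exact absurd h (by omega))]
      · have hle : PySem.List.len (PySem.Str.split₀ word) ≤ 2 := by omega
        have hleN : (PySem.Str.split₀ word).length ≤ 2 := by
          rw [PySem.List.len_eq] at hle
          exact_mod_cast hle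
        have hall : ((PySem.Str.split₀ word).attach.all (fun t =>
            match printable_tokens t.1 with
            | some ts => !ts.isEmpty
            | none => false))
            = decide (((PySem.Str.split₀ word).map PySem.Str.len).foldl max 0 ≤ 9) := by
          rw [Bool.eq_iff_iff, List.all_eq_true, decide_eq_true_iff, pv_foldl_max_le]
          constructor
          · intro h
            refine ⟨by norm_num, ?_⟩
            intro x hx
            rcases List.mem_map.mp hx with ⟨t, htm, rfl⟩
            have := h ⟨t, htm⟩ (List.mem_attach _ _)
            rw [pv_token_truthy word t htm] at this
            exact of_decide_eq_true this
          · rintro ⟨-, h⟩ ⟨t, htm⟩ -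
            rw [pv_token_truthy word t htm]
            exact decide_eq_true (h (PySem.Str.len t) (List.mem_map_of_mem htm))
        rw [if_neg hlen, hall]
        simp [hleN, hspC']

-- ===== VERDICT (by name: the statement is the Claim_ definition above) =====
theorem printable_tokens_spec : Claim_equal_printable_tokens := by
  intro word _
  exact printable_tokens_eq_alt word
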